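-- pv_equiv track=rewrite | github.com/Aiyane/PyLinq | PyLinq/interpreters/group_base_interpreter.py | group_func_star
-- ===== SOURCE A (Python) =====
-- def group_func_star(data_sources):
--     """
--     {
--         ('xxx', 'yyy'):
--         [
--             {
--                 'student': {'name': 'jay_chou', 'age': 40},
--                 'teacher': {'id': 'zzzz', 'year': 5}
--             },
--             {
--                 'student': {'name': 'jay_chow', 'age': 30},
--                 'teacher': {'id': 'xxxx', 'year': 6}
--             }
--         ]
--     } -> (
--         ['jay_chou', 'jay_chow'],
--         [40, 30],
--         ['zzzz', 'xxxx'],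
--         [5, 6]
--     )
--     """
--     res = []
--     for values in data_sources.values():
--         l = len(values)
--         instance_dict = values[0]
--         for table_name, line in instance_dict.items():
--             for column_name, v in line.items():
--                 row = [v]
--                 i = 0
--                 while i + 1 < l:
--                     instance_dict2 = values[i+1]
--                     row.append(instance_dict2[table_name][column_name])
--                     i += 1
--                 res.append(row)
--         return tuple(res)
-- ===== SOURCE B (Python) =====
-- def group_func_star(data_sources):
--     if not data_sources:
--         return None
--     values = next(iter(data_sources.values()))
--     first = values[0]
--     keys = [(t, c) for t, line in first.items() for c in line]
--     rows = [[inst[t][c] for (t, c) in keys] for inst in values]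
--     return tuple([row[j] for row in rows] for j in range(len(keys)))
-- ===== Notes on version B (the rewrite author's own statement) =====
-- stated objective: alternative
-- what changed: B derives the ordered (table,column) key list once from the first instance, builds each instance's row by direct key lookups, and transposes the row matrix by index, replacing A's per-key while-loop that rescans the instance list for every key.
-- outside the precondition, e.g. on group_func_star({}): A returns None, B returns None
import Mathlib
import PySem

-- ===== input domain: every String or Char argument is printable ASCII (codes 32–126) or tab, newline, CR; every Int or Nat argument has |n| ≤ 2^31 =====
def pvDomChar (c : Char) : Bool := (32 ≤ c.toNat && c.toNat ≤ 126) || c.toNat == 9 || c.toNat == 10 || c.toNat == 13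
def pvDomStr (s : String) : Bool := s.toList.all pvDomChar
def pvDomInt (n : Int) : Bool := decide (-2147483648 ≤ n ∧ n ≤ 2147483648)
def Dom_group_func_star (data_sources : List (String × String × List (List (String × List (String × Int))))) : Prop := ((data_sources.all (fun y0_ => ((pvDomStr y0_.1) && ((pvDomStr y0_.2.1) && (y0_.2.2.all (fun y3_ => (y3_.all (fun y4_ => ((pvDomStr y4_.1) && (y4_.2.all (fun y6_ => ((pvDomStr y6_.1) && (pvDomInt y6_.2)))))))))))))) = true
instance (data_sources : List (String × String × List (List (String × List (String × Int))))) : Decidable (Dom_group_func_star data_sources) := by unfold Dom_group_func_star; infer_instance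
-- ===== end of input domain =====

-- B rebuilds the result by direct key lookups and an index-based transpose of per-instance rows,
-- instead of A's per-key while-loop rescans; objective: alternative decomposition (similar cost).


-- ===== PORT A =====
-- shared primitive of both Pythons: `inst[table][column]` (two chained dict lookups; none = KeyError)
def pyLook (inst : List (String × List (String × Int))) (t c : String) : Option Int :=
  (PySem.Dict.get? (PySem.Dict.mk inst) t).bind (fun line => PySem.Dict.get? (PySem.Dict.mk line) c)

-- A's `while i + 1 < l` loop, appending values[i+1][table_name][column_name] to row
-- (the .getD defaults stand where Python raises IndexError/KeyError, excluded by Pre_)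
def groupRowA (values : List (List (String × List (String × Int)))) (table_name column_name : String)
    (l i : Int) (row : List Int) : List Int :=
  if _h : i + 1 < l then
    let instance_dict2 := (PySem.List.pyGet? values (i + 1)).getD []
    groupRowA values table_name column_name l (i + 1) (row ++ [(pyLook instance_dict2 table_name column_name).getD 0])
  else row
termination_by (l - i).toNat
decreasing_by omega

def group_func_star (data_sources : List (String × String × List (List (String × List (String × Int))))) : List (List Int) :=
  match data_sources with
  | [] => []   -- Python falls off the loop and returns None (excluded by Pre_)
  | (_, _, values) :: _ =>
    let l : Int := PySem.List.len values
    let instance_dict := (PySem.List.pyGet? values 0).getD []   -- values[0]; IndexError excluded by Pre_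
    instance_dict.foldl (fun res tl =>
      tl.2.foldl (fun res cv =>
        res ++ [groupRowA values tl.1 cv.1 l 0 [cv.2]]) res) []

-- ===== PORT B =====
def group_func_star_alt (data_sources : List (String × String × List (List (String × List (String × Int))))) : List (List Int) :=
  match data_sources with
  | [] => []   -- Python returns None (excluded by Pre_)
  | (_, _, values) :: _ =>
    let first := (PySem.List.pyGet? values 0).getD []   -- values[0]; IndexError excluded by Pre_
    let keys := first.flatMap (fun tl => tl.2.map (fun cv => (tl.1, cv.1)))
    let rows := values.map (fun inst => keys.map (fun tc => (pyLook inst tc.1 tc.2).getD 0))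
    (List.range keys.length).map (fun j => rows.map (fun row => row.getD j 0))

-- ===== PRECONDITION & SPEC =====
-- Pre_ excludes: empty input (A returns None, not a tuple), an empty first group (IndexError on
-- values[0]), a missing table/column key in some instance of the first group (KeyError), and first
-- instances whose association lists carry duplicate table or column keys — such duplicates cannot
-- arise from a Python dict at all.
def Pre_group_func_star (data_sources : List (String × String × List (List (String × List (String × Int))))) : Prop :=
  data_sources ≠ [] ∧
  ∀ g ∈ data_sources.take 1,
    g.2.2 ≠ [] ∧
    ∀ first ∈ g.2.2.take 1,
      (first.map Prod.fst).Nodup ∧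
      (∀ tl ∈ first, (tl.2.map Prod.fst).Nodup) ∧
      (∀ tl ∈ first, ∀ cv ∈ tl.2, ∀ inst ∈ g.2.2, (pyLook inst tl.1 cv.1).isSome = true)
instance (data_sources : List (String × String × List (List (String × List (String × Int))))) : Decidable (Pre_group_func_star data_sources) := by unfold Pre_group_func_star; infer_instance

def pvWitness_group_func_star : (List (String × String × List (List (String × List (String × Int))))) :=
  [("g", "x", [[("t", [("c", 1)])], [("t", [("c", 2)])]])]

def Spec_group_func_star (data_sources : List (String × String × List (List (String × List (String × Int))))) (out : List (List Int)) : Prop := out = group_func_star_alt data_sources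
instance (data_sources : List (String × String × List (List (String × List (String × Int))))) (out : List (List Int)) : Decidable (Spec_group_func_star data_sources out) := by unfold Spec_group_func_star; infer_instance

-- ===== CLAIM (what is proved, stated in full; the proofs are below) =====
def Claim_equal_group_func_star : Prop := ∀ (data_sources : List (String × String × List (List (String × List (String × Int))))), Dom_group_func_star data_sources → Pre_group_func_star data_sources → Spec_group_func_star data_sources (group_func_star data_sources)

-- ===== LEMMAS AND PROOFS =====

lemma rowA_drop (values : List (List (String × List (String × Int)))) (t c : String) :
    ∀ (n : Nat) (i : Int) (row : List Int), 0 ≤ i → values.length - (i + 1).toNat = n →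
      groupRowA values t c (PySem.List.len values) i row =
        row ++ (values.drop (i + 1).toNat).map (fun inst => (pyLook inst t c).getD 0) := by
  intro n
  induction n with
  | zero =>
    intro i row hi h
    rw [groupRowA, dif_neg (by simp [PySem.List.len_eq]; omega)]
    rw [List.drop_eq_nil_of_le (by omega)]
    simp
  | succ m ih =>
    intro i row hi h
    have hlt : (i + 1).toNat < values.length := by omega
    rw [groupRowA, dif_pos (by simp [PySem.List.len_eq]; omega)]
    rw [ih (i + 1) _ (by omega) (by omega)]
    rw [PySem.List.pyGet?_eq_some_getElem values (i := i + 1) (by omega) (by omega)]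
    have h2 : (i + 1 + 1).toNat = (i + 1).toNat + 1 := by omega
    rw [h2, List.append_assoc]
    congr 1
    rw [List.drop_eq_getElem_cons hlt]
    simp
    conv_rhs => rw [List.drop_eq_getElem_cons (by simpa using hlt)]
    simp
lemma rowA_zero (values : List (List (String × List (String × Int)))) (t c : String) (v : Int) :
    groupRowA values t c (PySem.List.len values) 0 [v] =
      v :: (values.drop 1).map (fun inst => (pyLook inst t c).getD 0) := by
  rw [rowA_drop values t c (values.length - 1) 0 [v] le_rfl (by omega)]
  norm_num

lemma dictlook_first (first : List (String × List (String × Int)))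
    (hnd1 : (first.map Prod.fst).Nodup)
    (hnd2 : ∀ tl ∈ first, (tl.2.map Prod.fst).Nodup)
    (tl : String × List (String × Int)) (htl : tl ∈ first)
    (cv : String × Int) (hcv : cv ∈ tl.2) :
    (pyLook first tl.1 cv.1).getD 0 = cv.2 := by
  unfold pyLook
  have h1 : (PySem.Dict.mk first).get? tl.1 = some tl.2 :=
    PySem.Dict.get?_of_mem_items (PySem.Dict.mk first) (by simpa using htl) (by simpa using hnd1)
  have h2 : (PySem.Dict.mk tl.2).get? cv.1 = some cv.2 :=
    PySem.Dict.get?_of_mem_items (PySem.Dict.mk tl.2) (by simpa using hcv) (by simpa using hnd2 tl htl)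
  simp [h1, h2]

theorem group_main (f0 : List (String × List (String × Int)))
    (tail : List (List (String × List (String × Int))))
    (hnd1 : (f0.map Prod.fst).Nodup)
    (hnd2 : ∀ tl ∈ f0, (tl.2.map Prod.fst).Nodup) :
    f0.foldl (fun res tl =>
      tl.2.foldl (fun res cv =>
        res ++ [groupRowA (f0 :: tail) tl.1 cv.1 (PySem.List.len (f0 :: tail)) 0 [cv.2]]) res) [] =
    (List.range (f0.flatMap (fun tl => tl.2.map (fun cv => (tl.1, cv.1)))).length).map
      (fun j => ((f0 :: tail).map (fun inst =>
        (f0.flatMap (fun tl => tl.2.map (fun cv => (tl.1, cv.1)))).map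
          (fun tc => (pyLook inst tc.1 tc.2).getD 0))).map (fun row => row.getD j 0)) := by
  -- A side: foldl → flatMap of per-key rows
  have hA : f0.foldl (fun res tl =>
      tl.2.foldl (fun res cv =>
        res ++ [groupRowA (f0 :: tail) tl.1 cv.1 (PySem.List.len (f0 :: tail)) 0 [cv.2]]) res) [] =
      f0.flatMap (fun tl => tl.2.map (fun cv =>
        cv.2 :: tail.map (fun inst => (pyLook inst tl.1 cv.1).getD 0))) := by
    simp only [PySem.List.foldl_append_singleton_eq_map, PySem.List.foldl_append_eq_flatMap,
      List.nil_append, rowA_zero, List.drop_one, List.tail_cons]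
  -- B side: range/transpose → flatMap of per-key columns
  set keys := f0.flatMap (fun tl => tl.2.map (fun cv => (tl.1, cv.1))) with hkeys
  have hB : (List.range keys.length).map
      (fun j => ((f0 :: tail).map (fun inst =>
        keys.map (fun tc => (pyLook inst tc.1 tc.2).getD 0))).map (fun row => row.getD j 0)) =
      keys.map (fun tc => (f0 :: tail).map (fun inst => (pyLook inst tc.1 tc.2).getD 0)) := by
    apply List.ext_getElem (by simp)
    intro j h1 h2
    simp only [List.getElem_map, List.getElem_range, List.map_map, Function.comp_def]
    apply List.ext_getElem (by simp)
    intro k hk1 hk2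
    simp only [List.getElem_map]
    rw [List.getD_eq_getElem _ _ (by simpa using (by simpa using h2))]
    simp
  rw [hA, hB, hkeys, List.map_flatMap]
  apply List.flatMap_congr
  intro tl htl
  rw [List.map_map]
  apply List.map_congr_left
  intro cv hcv
  simp only [Function.comp_def, List.map_cons]
  rw [dictlook_first f0 hnd1 hnd2 tl htl cv hcv]

-- ===== VERDICT (by name: the statement is the Claim_ definition above) =====
theorem group_func_star_spec : Claim_equal_group_func_star := by
  intro ds _hdom hpre
  unfold Spec_group_func_star
  obtain ⟨hne, h1⟩ := hpre
  match ds with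
  | [] => exact absurd rfl hne
  | (a, b, values) :: rest =>
    obtain ⟨hv, h2⟩ := h1 (a, b, values) (by simp)
    match values with
    | [] => exact absurd rfl hv
    | f0 :: tail =>
      obtain ⟨hnd1, hnd2, _hsome⟩ := h2 f0 (by simp)
      unfold group_func_star group_func_star_alt
      simp only [PySem.List.pyGet?_zero_cons, Option.getD_some]
      exact group_main f0 tail hnd1 hnd2
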